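-- pv_equiv track=rewrite | github.com/skytreader/pydagogical | algorithms/misc.py | get_non_decreasing_subranges
-- ===== SOURCE A (Python) =====
-- def get_non_decreasing_subranges(lnum):
--     """
--     Return inclusive subranges that are non-decreasing within lnum. The
--     continuity of subranges is based on the longest possible chains of
--     non-decreasing subranges.
--     """
--     i = 1
--     subrange_start = 0
--     limit = len(lnum)
--     subranges = set()
--
--     while i < limit:
--         if lnum[i] < lnum[i - 1]:
--             subranges.add((subrange_start, i - 1))
--             subrange_start = i
--         i += 1
--
--     if lnum and lnum[subrange_start] <= lnum[i - 1]:
--         subranges.add((subrange_start, i - 1))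
--
--     return subranges
-- ===== SOURCE B (Python) =====
-- def get_non_decreasing_subranges(lnum):
--     """Two-pass version: collect the cut points first, then emit the ranges."""
--     if not lnum:
--         return set()
--     cuts = [0]
--     for i in range(1, len(lnum)):
--         if lnum[i] < lnum[i - 1]:
--             cuts.append(i)
--     cuts.append(len(lnum))
--     return {(a, b - 1) for a, b in zip(cuts, cuts[1:])}
-- ===== Notes on version B (the rewrite author's own statement) =====
-- stated objective: alternative
-- what changed: Replaces A's single interleaved scan carrying a running start and conditional final insertion with two separate passes: first collect the boundary (cut) indices, then emit one (start, end) pair per adjacent boundary pair via zip.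
import Mathlib
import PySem

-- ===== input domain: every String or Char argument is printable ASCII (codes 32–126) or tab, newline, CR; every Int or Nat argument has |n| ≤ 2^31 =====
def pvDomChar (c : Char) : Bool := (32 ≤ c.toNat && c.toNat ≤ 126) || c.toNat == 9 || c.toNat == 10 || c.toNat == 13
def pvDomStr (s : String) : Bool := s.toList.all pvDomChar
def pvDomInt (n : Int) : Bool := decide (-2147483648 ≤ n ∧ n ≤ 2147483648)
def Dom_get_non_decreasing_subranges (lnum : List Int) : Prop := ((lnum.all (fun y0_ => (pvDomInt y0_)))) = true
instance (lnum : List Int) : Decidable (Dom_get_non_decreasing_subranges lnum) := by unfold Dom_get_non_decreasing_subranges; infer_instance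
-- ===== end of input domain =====

-- B replaces A's single interleaved scan by two passes (collect cut points, then emit ranges); same O(n) cost.

-- ===== PORT A =====
-- single scan: on each descent record the finished run and restart; conditionally record the last run.
-- (all list indices here are in range, so `pyGetD … 0` is exact for Python's lnum[i])
def get_non_decreasing_subranges (lnum : List Int) : List (Int × Int) :=
  let limit : Int := lnum.length
  let st :=
    (PySem.List.pyRange 1 limit 1).foldl
      (fun (st : Int × PySem.Set (Int × Int)) i =>
        if PySem.List.pyGetD lnum i 0 < PySem.List.pyGetD lnum (i - 1) 0 then
          (i, PySem.Set.add st.2 (st.1, i - 1))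
        else st)
      (0, PySem.Set.empty)
  let i : Int := max 1 limit
  if lnum ≠ [] ∧ PySem.List.pyGetD lnum st.1 0 ≤ PySem.List.pyGetD lnum (i - 1) 0 then
    PySem.Set.add st.2 (st.1, i - 1)
  else st.2

-- ===== PORT B =====
-- two passes: the cut-point list, then one pair per adjacent boundary pair.
def get_non_decreasing_subranges_alt (lnum : List Int) : List (Int × Int) :=
  if lnum.isEmpty then PySem.Set.empty
  else
    let cuts : List Int :=
      0 :: (PySem.List.pyRange 1 (lnum.length : Int) 1).filter
            (fun i => decide (PySem.List.pyGetD lnum i 0 < PySem.List.pyGetD lnum (i - 1) 0))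
        ++ [(lnum.length : Int)]
    PySem.Set.ofList ((cuts.zip cuts.tail).map (fun p => (p.1, p.2 - 1)))


-- ===== PRECONDITION & SPEC =====
def Spec_get_non_decreasing_subranges (lnum : List Int) (out : List (Int × Int)) : Prop := out = get_non_decreasing_subranges_alt lnum
instance (lnum : List Int) (out : List (Int × Int)) : Decidable (Spec_get_non_decreasing_subranges lnum out) := by unfold Spec_get_non_decreasing_subranges; infer_instance

-- ===== CLAIM (what is proved, stated in full; the proofs are below) =====
def Claim_equal_get_non_decreasing_subranges : Prop := ∀ (lnum : List Int), Dom_get_non_decreasing_subranges lnum → Spec_get_non_decreasing_subranges lnum (get_non_decreasing_subranges lnum)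

-- ===== LEMMAS AND PROOFS =====
-- the descent predicate, the emitted run pairs for a cut list, and supporting lemmas
def pvCutP (lnum : List Int) (i : Int) : Bool :=
  decide (PySem.List.pyGetD lnum i 0 < PySem.List.pyGetD lnum (i - 1) 0)

def pvRunPairs (s : Int) : List Int → List (Int × Int)
  | [] => []
  | c :: cs => (s, c - 1) :: pvRunPairs c cs


theorem pvGetLastD_cons (c s : Int) (cs : List Int) :
    (c :: cs).getLastD s = cs.getLastD c := List.getLastD_cons

theorem pvGetLastD_mem (s : Int) (cs : List Int) :
    cs.getLastD s = s ∨ cs.getLastD s ∈ cs := by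
  simpa [List.mem_cons, eq_comm] using
    List.mem_cons.1 (List.getLastD_mem_cons (l := cs) (a := s))

theorem pvZipPairs (s : Int) (cs : List Int) :
    (((s :: cs).zip cs).map (fun p => (p.1, p.2 - 1))) = pvRunPairs s cs := by
  induction cs generalizing s with
  | nil => simp [pvRunPairs]
  | cons c cs ih => simp [pvRunPairs, List.zip, ← ih c]

theorem pvRunPairs_snoc (s n : Int) (cs : List Int) :
    pvRunPairs s (cs ++ [n]) = pvRunPairs s cs ++ [(cs.getLastD s, n - 1)] := by
  induction cs generalizing s with
  | nil => simp [pvRunPairs]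
  | cons c cs ih =>
    rw [pvGetLastD_cons]
    simp only [List.cons_append, pvRunPairs, ih c]

theorem pvMemLeGetLastD (l : List Int) (d : Int) (h : l.Pairwise (· < ·)) :
    ∀ x ∈ l, x ≤ l.getLastD d := by
  induction l generalizing d with
  | nil => simp
  | cons c cs ih =>
    intro x hx
    rw [pvGetLastD_cons]
    rcases List.mem_cons.1 hx with rfl | hx
    · rcases pvGetLastD_mem x cs with hm | hm
      · omega
      · have := (List.pairwise_cons.1 h).1 _ hm
        omega
    · exact ih c (List.pairwise_cons.1 h).2 x hx

theorem pvRunPairs_fst_lt (s : Int) (cs : List Int) (h : cs.Pairwise (· < ·))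
    (hs : ∀ c ∈ cs, s < c) :
    ∀ x ∈ pvRunPairs s cs, x.1 < cs.getLastD s := by
  induction cs generalizing s with
  | nil => simp [pvRunPairs]
  | cons c cs ih =>
    intro x hx
    rw [pvGetLastD_cons]
    have hp := List.pairwise_cons.1 h
    rcases List.mem_cons.1 hx with rfl | hx
    · have h1 : s < c := hs c (by simp)
      have h2 : c ≤ cs.getLastD c := by
        rcases pvGetLastD_mem c cs with hm | hm
        · omega
        · have := hp.1 _ hm; omega
      show s < cs.getLastD c
      omega
    · exact ih c hp.2 hp.1 x hx

theorem pvRunPairs_fst_ge (s : Int) (cs : List Int) (h : cs.Pairwise (· < ·))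
    (hs : ∀ c ∈ cs, s ≤ c) :
    ∀ x ∈ pvRunPairs s cs, s ≤ x.1 := by
  induction cs generalizing s with
  | nil => simp [pvRunPairs]
  | cons c cs ih =>
    intro x hx
    have hp := List.pairwise_cons.1 h
    rcases List.mem_cons.1 hx with rfl | hx
    · simp
    · have h1 : s ≤ c := hs c (by simp)
      have := ih c hp.2 (fun y hy => le_of_lt (hp.1 y hy)) x hx
      omega

theorem pvRunPairs_nodup (s : Int) (cs : List Int) (h : cs.Pairwise (· < ·))
    (hs : ∀ c ∈ cs, s < c) : (pvRunPairs s cs).Nodup := by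
  induction cs generalizing s with
  | nil => simp [pvRunPairs]
  | cons c cs ih =>
    have hp := List.pairwise_cons.1 h
    refine List.nodup_cons.2 ⟨?_, ih c hp.2 hp.1⟩
    intro hm
    have := pvRunPairs_fst_ge c cs hp.2 (fun y hy => le_of_lt (hp.1 y hy)) _ hm
    have h1 : s < c := hs c (by simp)
    simp at this; omega

theorem pvSetAdd_not_mem {α : Type} [BEq α] [LawfulBEq α] (s : List α) (x : α) (h : x ∉ s) :
    PySem.Set.add s x = s ++ [x] := by
  simp [PySem.Set.add, PySem.Set.contains, h]

theorem pvFoldA (lnum : List Int) (l : List Int) (s0 : Int) (acc : List (Int × Int))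
    (hacc : ∀ x ∈ acc, x.1 < s0) (hl : ∀ i ∈ l, s0 < i) (hp : l.Pairwise (· < ·)) :
    l.foldl
      (fun (st : Int × PySem.Set (Int × Int)) i =>
        if PySem.List.pyGetD lnum i 0 < PySem.List.pyGetD lnum (i - 1) 0 then
          (i, PySem.Set.add st.2 (st.1, i - 1))
        else st)
      (s0, acc)
      = ((l.filter (pvCutP lnum)).getLastD s0,
         acc ++ pvRunPairs s0 (l.filter (pvCutP lnum))) := by
  induction l generalizing s0 acc with
  | nil => simp [pvRunPairs]
  | cons i l ih =>
    have hpi := List.pairwise_cons.1 hp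
    have hsi : s0 < i := hl i (by simp)
    by_cases hc : PySem.List.pyGetD lnum i 0 < PySem.List.pyGetD lnum (i - 1) 0
    · have hmem : ((s0, i - 1) : Int × Int) ∉ acc := by
        intro hm; have := hacc _ hm; simp at this
      have hadd := pvSetAdd_not_mem acc (s0, i - 1) hmem
      have hrec := ih i (acc ++ [(s0, i - 1)])
        (by intro x hx
            rcases List.mem_append.1 hx with hx | hx
            · have := hacc _ hx; omega
            · simp at hx; subst hx; exact hsi)
        hpi.1 hpi.2
      simp only [List.foldl_cons, hadd, hrec, List.filter_cons,
        pvCutP, decide_eq_true_eq, hc, if_pos, List.getLastD_cons, pvRunPairs]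
      simp
    · have hrec := ih s0 acc hacc (fun j hj => lt_trans hsi (hpi.1 j hj)) hpi.2
      simp only [List.foldl_cons, hrec, List.filter_cons, pvCutP,
        decide_eq_true_eq, hc, ite_false]

theorem pvChain (lnum : List Int) (a b : Nat) (hab : a ≤ b) (hb : b < lnum.length)
    (h : ∀ i : Nat, a < i → i ≤ b → pvCutP lnum (i : Int) = false) :
    PySem.List.pyGetD lnum (a : Int) 0 ≤ PySem.List.pyGetD lnum (b : Int) 0 := by
  induction b with
  | zero => interval_cases a; rfl
  | succ b ihb =>
    by_cases hab' : a = b + 1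
    · subst hab'; exact le_refl _
    · have h1 := ihb (by omega) (by omega) (fun i hi1 hi2 => h i hi1 (by omega))
      have h2 := h (b + 1) (by omega) le_rfl
      unfold pvCutP at h2
      simp only [decide_eq_false_iff_not, not_lt] at h2
      have e : ((b + 1 : Nat) : Int) - 1 = (b : Int) := by push_cast; ring
      rw [e] at h2
      exact le_trans h1 h2

theorem pvMain (lnum : List Int) :
    get_non_decreasing_subranges lnum = get_non_decreasing_subranges_alt lnum := by
  by_cases hn : lnum = []
  · subst hn; rfl
  · have hlen : 0 < lnum.length := List.length_pos_of_ne_nil hn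
    have hN : (1 : Int) ≤ (lnum.length : Int) := by exact_mod_cast hlen
    set N : Int := (lnum.length : Int) with hNdef
    set F : List Int := (PySem.List.pyRange 1 N 1).filter (pvCutP lnum) with hF
    have hFp : F.Pairwise (· < ·) := (PySem.List.pairwise_lt_pyRange_one 1 N).filter _
    have hFmem : ∀ c ∈ F, 1 ≤ c ∧ c < N := by
      intro c hc
      have := (List.mem_filter.1 hc).1
      exact (PySem.List.mem_pyRange_one.1 this)
    set start : Int := F.getLastD 0 with hstartdef
    have hstart : 0 ≤ start ∧ start < N := by
      rcases pvGetLastD_mem 0 F with hm | hm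
      · constructor <;> omega
      · have := hFmem _ hm; constructor <;> omega
    -- the fold in A
    have hfold := pvFoldA lnum (PySem.List.pyRange 1 N 1) 0 []
      (by simp)
      (fun i hi => by have := PySem.List.mem_pyRange_one.1 hi; omega)
      (PySem.List.pairwise_lt_pyRange_one 1 N)
    -- the final condition in A holds
    have hcond : PySem.List.pyGetD lnum start 0 ≤ PySem.List.pyGetD lnum (N - 1) 0 := by
      have hch := pvChain lnum start.toNat (lnum.length - 1)
        (by omega) (by omega)
        (by intro i hi1 hi2
            by_contra hcut
            have hcut' : pvCutP lnum (i : Int) = true := by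
              cases h' : pvCutP lnum (i : Int) <;> simp [h'] at hcut ⊢
            have hiF : (i : Int) ∈ F := by
              rw [hF]
              refine List.mem_filter.2 ⟨PySem.List.mem_pyRange_one.2 ⟨by omega, by omega⟩, hcut'⟩
            have := pvMemLeGetLastD F 0 hFp _ hiF
            rw [← hstartdef] at this
            omega)
      have e1 : ((start.toNat : Nat) : Int) = start := by omega
      have e2 : (((lnum.length - 1 : Nat)) : Int) = N - 1 := by omega
      rw [e1, e2] at hch
      exact hch
    -- untangle A
    have hmax : max 1 N = N := by omega
    have hnot : ((start, N - 1) : Int × Int) ∉ pvRunPairs 0 F := by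
      intro hm
      have := pvRunPairs_fst_lt 0 F hFp (fun c hc => by have := hFmem c hc; omega) _ hm
      rw [← hstartdef] at this
      simp at this
    have hA : get_non_decreasing_subranges lnum
        = pvRunPairs 0 F ++ [(start, N - 1)] := by
      simp only [get_non_decreasing_subranges, ← hNdef, PySem.Set.empty]
      rw [hfold]
      simp only [← hF, ← hstartdef, List.nil_append, hmax]
      rw [if_pos ⟨hn, hcond⟩]
      exact pvSetAdd_not_mem _ _ hnot
    -- untangle B
    have hBpair : (F ++ [N]).Pairwise (· < ·) := by
      refine List.pairwise_append.2 ⟨hFp, by simp, ?_⟩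
      intro a ha b hb
      simp at hb; subst hb
      exact (hFmem a ha).2
    have hBpos : ∀ c ∈ F ++ [N], 0 < c := by
      intro c hc
      rcases List.mem_append.1 hc with hc | hc
      · have := hFmem c hc; omega
      · simp at hc; omega
    have hB : get_non_decreasing_subranges_alt lnum
        = pvRunPairs 0 F ++ [(start, N - 1)] := by
      simp only [get_non_decreasing_subranges_alt, ← hNdef]
      rw [if_neg (by simpa using hn)]
      have hcuts : (0 : Int) :: (PySem.List.pyRange 1 N 1).filter
            (fun i => decide (PySem.List.pyGetD lnum i 0 < PySem.List.pyGetD lnum (i - 1) 0))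
          ++ [N] = 0 :: (F ++ [N]) := by
        rw [hF]; rfl
      rw [hcuts]
      have htail : ((0 : Int) :: (F ++ [N])).tail = F ++ [N] := rfl
      rw [htail, pvZipPairs,
        PySem.Set.ofList_eq_self_of_nodup _ (pvRunPairs_nodup 0 (F ++ [N]) hBpair hBpos),
        pvRunPairs_snoc, ← hstartdef]
    rw [hA, hB]

-- ===== VERDICT (by name: the statement is the Claim_ definition above) =====
theorem get_non_decreasing_subranges_spec : Claim_equal_get_non_decreasing_subranges := by
  intro lnum _
  exact pvMain lnum
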